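-- pv_equiv track=rewrite | github.com/kroker42/AoC2021 | main.py | get_weighted_distances
-- ===== SOURCE A (Python) =====
-- def get_weighted_distances(crabs):
--     min_crab = min(crabs)
--     max_crab = max(crabs)
--     distances = {i: 0 for i in range(min_crab, max_crab + 1)}
--
--     for c in crabs:
--         for i in distances.keys():
--             dist = abs(c - i)
--             distances[i] += dist * (dist + 1) // 2
--
--     return distances
-- ===== SOURCE B (Python) =====
-- def get_weighted_distances(crabs):
--     lo = min(crabs)
--     hi = max(crabs)
--     n = len(crabs)
--     s1 = sum(crabs)
--     cnt = {}
--     for c in crabs: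
--         cnt[c] = cnt.get(c, 0) + 1
--     sabs = sum(abs(c - lo) for c in crabs)
--     ssq = sum((c - lo) ** 2 for c in crabs)
--     res = {lo: (ssq + sabs) // 2}
--     le = cnt.get(lo, 0)
--     for i in range(lo, hi):
--         ssq += -2 * (s1 - n * i) + n
--         sabs += 2 * le - n
--         le += cnt.get(i + 1, 0)
--         res[i + 1] = (ssq + sabs) // 2
--     return res
-- ===== Notes on version B (the rewrite author's own statement) =====
-- stated objective: faster
-- what changed: Replaces A's nested loops (for every crab, for every position, a triangular weight) by a single O(n+R) sweep: per position i the total weight equals (sum of squared distances + sum of absolute distances)//2, and both sums are updated in O(1) from i to i+1 using precomputed n, sum(crabs) and a count dict.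
import Mathlib
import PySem

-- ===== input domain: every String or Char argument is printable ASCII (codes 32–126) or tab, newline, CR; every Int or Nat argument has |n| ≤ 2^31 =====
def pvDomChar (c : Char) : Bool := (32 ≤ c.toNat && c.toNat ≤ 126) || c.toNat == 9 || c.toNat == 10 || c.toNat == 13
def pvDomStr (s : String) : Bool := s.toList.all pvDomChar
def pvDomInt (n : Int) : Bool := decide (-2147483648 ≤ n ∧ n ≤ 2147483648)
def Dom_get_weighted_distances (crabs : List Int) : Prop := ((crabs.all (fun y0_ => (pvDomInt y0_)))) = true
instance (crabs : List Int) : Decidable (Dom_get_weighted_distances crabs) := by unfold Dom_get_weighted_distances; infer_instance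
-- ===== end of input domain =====

-- B replaces A's O(n·R) nested loops by an O(n + R) sweep: per-position triangular cost
-- (Σ_c d(d+1)/2 with d = |c-i|) equals ((Σ(c-i)²) + (Σ|c-i|))//2, and both sums are updated
-- in O(1) from position i to i+1 using the element count at i+1 (a counter dict).

-- ===== PORT A =====
def get_weighted_distances (crabs : List Int) : List (Int × Int) :=
  match PySem.List.min? crabs (fun x => x), PySem.List.max? crabs (fun x => x) with
  | some min_crab, some max_crab =>
    let distances0 : PySem.Dict Int Int :=
      (PySem.List.pyRange min_crab (max_crab + 1) 1).foldl (fun d i => d.insert i 0) (PySem.Dict.empty : PySem.Dict Int Int)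
    let distances :=
      crabs.foldl (fun d c =>
        d.keys.foldl (fun d i =>
          let dist := |c - i|
          d.modify i 0 (fun v => v + PySem.Int.floordiv (dist * (dist + 1)) 2)) d) distances0
    distances.items
  | _, _ => []

-- ===== PORT B =====
def get_weighted_distances_alt (crabs : List Int) : List (Int × Int) :=
  match PySem.List.min? crabs (fun x => x) with
  | none => []
  | some lo =>
  match PySem.List.max? crabs (fun x => x) with
  | none => []
  | some hi =>
    let n : Int := crabs.length
    let s1 : Int := crabs.foldl (fun a c => a + c) 0
    let cnt : PySem.Dict Int Int :=
      crabs.foldl (fun d c => d.insert c (d.getD c 0 + 1)) PySem.Dict.empty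
    let sabs : Int := crabs.foldl (fun a c => a + |c - lo|) 0
    let ssq : Int := crabs.foldl (fun a c => a + (c - lo) ^ 2) 0
    let res : PySem.Dict Int Int := PySem.Dict.empty.insert lo (PySem.Int.floordiv (ssq + sabs) 2)
    let st := (PySem.List.pyRange lo hi 1).foldl
      (fun (st : Int × Int × Int × PySem.Dict Int Int) i =>
        let ssq := st.1 - 2 * (s1 - n * i) + n
        let sabs := st.2.1 + 2 * st.2.2.1 - n
        let le := st.2.2.1 + cnt.getD (i + 1) 0
        (ssq, sabs, le, st.2.2.2.insert (i + 1) (PySem.Int.floordiv (ssq + sabs) 2)))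
      (ssq, sabs, cnt.getD lo 0, res)
    st.2.2.2.items

-- ===== PRECONDITION & SPEC =====
-- Python's min/max raise ValueError on an empty list, so A (and B) raise there.
def Pre_get_weighted_distances (crabs : List Int) : Prop := crabs ≠ []
instance (crabs : List Int) : Decidable (Pre_get_weighted_distances crabs) := by
  unfold Pre_get_weighted_distances; infer_instance
def pvWitness_get_weighted_distances : List Int := ([1, 0, 4])
def Spec_get_weighted_distances (crabs : List Int) (out : List (Int × Int)) : Prop :=
  out = get_weighted_distances_alt crabs
instance (crabs : List Int) (out : List (Int × Int)) : Decidable (Spec_get_weighted_distances crabs out) := by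
  unfold Spec_get_weighted_distances; infer_instance

-- ===== CLAIM (what is proved, stated in full; the proofs are below) =====
def Claim_equal_get_weighted_distances : Prop := ∀ (crabs : List Int),
  Dom_get_weighted_distances crabs → Pre_get_weighted_distances crabs →
  Spec_get_weighted_distances crabs (get_weighted_distances crabs)

-- ===== LEMMAS AND PROOFS =====

def pvTri (d : Int) : Int := PySem.Int.floordiv (d * (d + 1)) 2
def pvT (crabs : List Int) (i : Int) : Int := (crabs.map (fun c => pvTri |c - i|)).sum
def pvSsq (crabs : List Int) (i : Int) : Int := (crabs.map (fun c => (c - i) ^ 2)).sum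
def pvSabs (crabs : List Int) (i : Int) : Int := (crabs.map (fun c => |c - i|)).sum
def pvLe (crabs : List Int) (i : Int) : Int := (crabs.countP (fun c => c ≤ i) : Int)
def pvF (crabs : List Int) (i : Int) : Int :=
  PySem.Int.floordiv (pvSsq crabs i + pvSabs crabs i) 2

theorem pv_floordiv_two_mul (k : Int) : PySem.Int.floordiv (2 * k) 2 = k := by
  rw [PySem.Int.floordiv_eq_ediv_of_pos (by norm_num)]
  exact Int.mul_ediv_cancel_left k (by norm_num)

theorem pv_two_tri (d : Int) : 2 * pvTri d = d ^ 2 + d := by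
  obtain ⟨k, hk⟩ := Int.even_mul_succ_self d
  have hk2 : d * (d + 1) = 2 * k := by omega
  unfold pvTri
  rw [hk2, pv_floordiv_two_mul]
  nlinarith [hk2]

theorem pv_two_T (crabs : List Int) (i : Int) :
    pvSsq crabs i + pvSabs crabs i = 2 * pvT crabs i := by
  induction crabs with
  | nil => simp [pvSsq, pvSabs, pvT]
  | cons c t ih =>
    have h := pv_two_tri |c - i|
    simp only [pvSsq, pvSabs, pvT, List.map_cons, List.sum_cons] at *
    nlinarith [ih, h, sq_abs (c - i)]

theorem pvF_eq_pvT (crabs : List Int) (i : Int) : pvF crabs i = pvT crabs i := by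
  unfold pvF
  rw [pv_two_T, pv_floordiv_two_mul]

theorem pv_foldl_add (f : Int → Int) (l : List Int) (a : Int) :
    l.foldl (fun a c => a + f c) a = a + (l.map f).sum := by
  induction l generalizing a with
  | nil => simp
  | cons x t ih => simp [List.foldl_cons, ih, add_assoc]

theorem pv_foldl_add_id (l : List Int) (a : Int) :
    l.foldl (fun a c => a + c) a = a + (l.map (fun c => c)).sum :=
  pv_foldl_add (fun c => c) l a

-- recurrence lemmas for the sweep
theorem pvSsq_succ (crabs : List Int) (i : Int) :
    pvSsq crabs (i + 1) = pvSsq crabs i - 2 * ((crabs.map (fun c => c)).sum - crabs.length * i) + crabs.length := by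
  induction crabs with
  | nil => simp [pvSsq]
  | cons c t ih =>
    simp only [pvSsq, List.map_cons, List.sum_cons, List.length_cons] at *
    rw [ih]
    push_cast
    ring

theorem pvSabs_succ (crabs : List Int) (i : Int) :
    pvSabs crabs (i + 1) = pvSabs crabs i + 2 * pvLe crabs i - crabs.length := by
  induction crabs with
  | nil => simp [pvSabs, pvLe]
  | cons c t ih =>
    have hstep : |c - (i + 1)| = |c - i| + (if c ≤ i then 1 else -1) := by
      by_cases h : c ≤ i
      · rw [if_pos h, abs_of_nonpos (by omega), abs_of_nonpos (by omega)]; omega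
      · rw [if_neg h, abs_of_nonneg (by omega), abs_of_nonneg (by omega)]; omega
    simp only [pvSabs, pvLe, List.map_cons, List.sum_cons, List.length_cons,
      List.countP_cons, decide_eq_true_eq] at *
    rw [hstep]
    push_cast at *
    split_ifs <;> omega

theorem pvLe_succ (crabs : List Int) (i : Int) :
    pvLe crabs (i + 1) = pvLe crabs i + crabs.count (i + 1) := by
  induction crabs with
  | nil => simp [pvLe]
  | cons c t ih =>
    simp only [pvLe, List.countP_cons, List.count_cons, beq_iff_eq, decide_eq_true_eq] at *
    push_cast at *
    split_ifs <;> omega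

theorem pvLe_min (crabs : List Int) (lo : Int) (h : ∀ c ∈ crabs, lo ≤ c) :
    pvLe crabs lo = crabs.count lo := by
  unfold pvLe
  rw [List.count_eq_countP]
  congr 1
  apply List.countP_congr
  intro a ha
  have := h a ha
  by_cases h2 : a = lo
  · subst h2; simp
  · simp [h2]; omega

theorem pv_update_self (s l : List Int) (h : ∀ x ∈ l, x ∈ s) : PySem.Set.update s l = s := by
  induction l generalizing s with
  | nil => rfl
  | cons a t ih =>
    have ha : PySem.Set.add s a = s := by
      simp [PySem.Set.add, h a (by simp)]
    have : PySem.Set.update s (a :: t) = PySem.Set.update (PySem.Set.add s a) t := rfl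
    rw [this, ha]
    exact ih s (fun x hx => h x (by simp [hx]))

theorem pv_getD0 (l : List Int) (d : PySem.Dict Int Int) (h : ∀ j, d.getD j 0 = 0) (j : Int) :
    (l.foldl (fun d i => d.insert i 0) d).getD j 0 = 0 := by
  induction l generalizing d with
  | nil => simpa using h j
  | cons a t ih =>
    simp only [List.foldl_cons]
    refine ih _ (fun j' => ?_)
    rw [PySem.Dict.getD_insert]
    split_ifs with hja
    · rfl
    · exact h j'

theorem pv_inner (c : Int) (l : List Int) (hnd : l.Nodup) (d : PySem.Dict Int Int) (j : Int) :
    (l.foldl (fun d i => d.modify i 0 (fun v => v + pvTri |c - i|)) d).getD j 0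
      = d.getD j 0 + (if j ∈ l then pvTri |c - j| else 0) := by
  induction l generalizing d with
  | nil => simp
  | cons a t ih =>
    simp only [List.foldl_cons]
    rw [ih (by exact hnd.of_cons) _]
    rw [PySem.Dict.getD_modify]
    by_cases hja : j = a
    · subst hja
      have hjt : j ∉ t := by
        intro hmem
        exact (List.nodup_cons.mp hnd).1 hmem
      simp [hjt]
    · simp [hja, List.mem_cons]

theorem pv_outer (crabs' : List Int) (d : PySem.Dict Int Int) (hnd : d.keys.Nodup) :
    (crabs'.foldl (fun d c =>
        d.keys.foldl (fun d i => d.modify i 0 (fun v => v + pvTri |c - i|)) d) d).keys = d.keys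
    ∧ ∀ j, (crabs'.foldl (fun d c =>
        d.keys.foldl (fun d i => d.modify i 0 (fun v => v + pvTri |c - i|)) d) d).getD j 0
      = d.getD j 0 + (if j ∈ d.keys then pvT crabs' j else 0) := by
  induction crabs' generalizing d with
  | nil => simp [pvT]
  | cons c cs ih =>
    simp only [List.foldl_cons]
    have hkeys : (d.keys.foldl (fun d i => d.modify i 0 (fun v => v + pvTri |c - i|)) d).keys
        = d.keys := by
      rw [PySem.Dict.keys_foldl_modify d.keys 0 (fun _ i => (fun v => v + pvTri |c - i|)) d]
      exact pv_update_self _ _ (fun x hx => hx)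
    obtain ⟨ihk, ihg⟩ := ih (d.keys.foldl (fun d i => d.modify i 0 (fun v => v + pvTri |c - i|)) d)
      (by rw [hkeys]; exact hnd)
    refine ⟨by rw [ihk, hkeys], fun j => ?_⟩
    rw [ihg j, hkeys, pv_inner c d.keys hnd d j]
    by_cases hj : j ∈ d.keys
    · simp [hj, pvT, add_assoc]
    · simp [hj]

theorem thmA (crabs : List Int) (lo hi : Int)
    (h1 : PySem.List.min? crabs (fun x => x) = some lo)
    (h2 : PySem.List.max? crabs (fun x => x) = some hi) :
    get_weighted_distances crabs
      = (PySem.List.pyRange lo (hi + 1) 1).map (fun i => (i, pvT crabs i)) := by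
  unfold get_weighted_distances
  rw [h1, h2]
  simp only []
  have hfun : (fun (d : PySem.Dict Int Int) (c : Int) =>
      List.foldl (fun d i => d.modify i 0 fun v => v + PySem.Int.floordiv (|c - i| * (|c - i| + 1)) 2) d d.keys)
    = (fun (d : PySem.Dict Int Int) (c : Int) =>
      List.foldl (fun d i => d.modify i 0 fun v => v + pvTri |c - i|) d d.keys) := rfl
  rw [hfun]
  have hitems0 : ((PySem.List.pyRange lo (hi + 1) 1).foldl
      (fun d i => d.insert i 0) (PySem.Dict.empty : PySem.Dict Int Int)).items
      = (PySem.List.pyRange lo (hi + 1) 1).map (fun i => (i, (0 : Int))) := by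
    exact PySem.Dict.items_foldl_insert_fresh (PySem.List.pyRange lo (hi + 1) 1)
      (fun a => a) (fun _ => (0 : Int)) PySem.Dict.empty (by simp)
      (by simpa using PySem.List.nodup_pyRange_one lo (hi + 1))
  have hkeys0 : ((PySem.List.pyRange lo (hi + 1) 1).foldl
      (fun d i => d.insert i 0) (PySem.Dict.empty : PySem.Dict Int Int)).keys = PySem.List.pyRange lo (hi + 1) 1 := by
    have hk : ((PySem.List.pyRange lo (hi + 1) 1).foldl
        (fun d i => d.insert i 0) (PySem.Dict.empty : PySem.Dict Int Int)).keys
        = ((PySem.List.pyRange lo (hi + 1) 1).foldl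
        (fun d i => d.insert i 0) (PySem.Dict.empty : PySem.Dict Int Int)).items.map Prod.fst := rfl
    rw [hk, hitems0, List.map_map]
    rw [show (Prod.fst ∘ fun i : Int => (i, (0 : Int))) = (id : Int → Int) from rfl, List.map_id]
  have hnd0 : ((PySem.List.pyRange lo (hi + 1) 1).foldl
      (fun d i => d.insert i 0) (PySem.Dict.empty : PySem.Dict Int Int)).keys.Nodup := by
    rw [hkeys0]; exact PySem.List.nodup_pyRange_one lo (hi + 1)
  have hg0 : ∀ j, ((PySem.List.pyRange lo (hi + 1) 1).foldl
      (fun d i => d.insert i 0) (PySem.Dict.empty : PySem.Dict Int Int)).getD j 0 = 0 := by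
    intro j
    exact pv_getD0 _ _ (fun j => PySem.Dict.getD_empty j 0) j
  obtain ⟨hk, hg⟩ := pv_outer crabs _ hnd0
  rw [PySem.Dict.items_eq_map_keys _ (by rw [hk]; exact hnd0) 0, hk, hkeys0]
  refine List.map_congr_left (fun j hj => ?_)
  rw [hg j, hg0 j, hkeys0]
  simp [hj]

theorem pv_mk_insert_fresh (M : List (Int × Int)) (k : Int) (v : Int)
    (h : k ∉ M.map Prod.fst) :
    (PySem.Dict.mk M).insert k v = PySem.Dict.mk (M ++ [(k, v)]) := by
  have hc : (PySem.Dict.mk M).contains k = false := by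
    simp only [PySem.Dict.contains_mk, List.any_eq_false, beq_iff_eq]
    intro p hp hpk
    exact h (List.mem_map.mpr ⟨p, hp, hpk⟩)
  apply PySem.Dict.ext
  rw [PySem.Dict.items_insert_of_not_contains _ _ hc]

theorem pv_LB (crabs : List Int) (lo : Int) (k : Nat) :
    (PySem.List.pyRange lo (lo + k) 1).foldl
      (fun (st : Int × Int × Int × PySem.Dict Int Int) i =>
        (st.1 - 2 * ((crabs.map (fun c => c)).sum - (crabs.length : Int) * i) + (crabs.length : Int),
         st.2.1 + 2 * st.2.2.1 - (crabs.length : Int),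
         st.2.2.1 + (crabs.count (i + 1) : Int),
         st.2.2.2.insert (i + 1) (PySem.Int.floordiv
           ((st.1 - 2 * ((crabs.map (fun c => c)).sum - (crabs.length : Int) * i) + (crabs.length : Int))
            + (st.2.1 + 2 * st.2.2.1 - (crabs.length : Int))) 2)))
      (pvSsq crabs lo, pvSabs crabs lo, pvLe crabs lo,
        PySem.Dict.empty.insert lo (PySem.Int.floordiv (pvSsq crabs lo + pvSabs crabs lo) 2))
    = (pvSsq crabs (lo + k), pvSabs crabs (lo + k), pvLe crabs (lo + k),
       PySem.Dict.mk ((PySem.List.pyRange lo (lo + k + 1) 1).map (fun i => (i, pvF crabs i)))) := by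
  induction k with
  | zero =>
    simp only [Nat.cast_zero, add_zero]
    rw [PySem.List.pyRange_one_eq_nil (le_refl lo), List.foldl_nil,
      PySem.List.pyRange_one_singleton]
    rfl
  | succ k ih =>
    rw [show (((k + 1 : Nat)) : Int) = (k : Int) + 1 from by push_cast; ring,
      show lo + ((k : Int) + 1) = (lo + (k : Int)) + 1 from by ring,
      PySem.List.pyRange_one_succ_right (by omega : lo ≤ lo + (k : Int)),
      List.foldl_append, ih, List.foldl_cons, List.foldl_nil]
    have hfresh : (lo + (k : Int)) + 1
        ∉ ((PySem.List.pyRange lo (lo + (k : Int) + 1) 1).map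
            (fun i => (i, pvF crabs i))).map Prod.fst := by
      simp only [List.map_map]
      rw [show (Prod.fst ∘ fun i : Int => (i, pvF crabs i)) = id from rfl, List.map_id]
      simp only [PySem.List.mem_pyRange_one]
      omega
    simp only []
    rw [← pvSsq_succ crabs (lo + (k : Int)), ← pvSabs_succ crabs (lo + (k : Int)),
      ← pvLe_succ crabs (lo + (k : Int)),
      pv_mk_insert_fresh _ _ _ hfresh,
      PySem.List.pyRange_one_succ_right (by omega : lo ≤ lo + (k : Int) + 1),
      List.map_append]
    rfl

theorem thmB (crabs : List Int) (lo hi : Int)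
    (h1 : PySem.List.min? crabs (fun x => x) = some lo)
    (h2 : PySem.List.max? crabs (fun x => x) = some hi) :
    get_weighted_distances_alt crabs
      = (PySem.List.pyRange lo (hi + 1) 1).map (fun i => (i, pvF crabs i)) := by
  have hlomem : lo ∈ crabs := PySem.List.min?_mem h1
  have hmin : ∀ c ∈ crabs, lo ≤ c := fun c hc => PySem.List.min?_isMin h1 c hc
  have hlohi : lo ≤ hi := PySem.List.max?_isMax h2 lo hlomem
  unfold get_weighted_distances_alt
  rw [h1, h2]
  simp only [pv_foldl_add_id, pv_foldl_add, PySem.Dict.getD_foldl_insert_add_one, PySem.Dict.getD_empty, zero_add]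
  rw [show (crabs.map (fun c => |c - lo|)).sum = pvSabs crabs lo from rfl,
    show (crabs.map (fun c => (c - lo) ^ 2)).sum = pvSsq crabs lo from rfl,
    ← pvLe_min crabs lo hmin,
    show hi = lo + (((hi - lo).toNat : Nat) : Int) from by omega]
  rw [pv_LB crabs lo (hi - lo).toNat]

-- ===== VERDICT (by name: the statement is the Claim_ definition above) =====
theorem get_weighted_distances_spec : Claim_equal_get_weighted_distances := by
  intro crabs _ hpre
  unfold Spec_get_weighted_distances
  cases h1 : PySem.List.min? crabs (fun x => x) with
  | none => exact absurd ((PySem.List.min?_eq_none_iff _ _).mp h1) hpre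
  | some lo =>
    cases h2 : PySem.List.max? crabs (fun x => x) with
    | none => exact absurd ((PySem.List.max?_eq_none_iff _ _).mp h2) hpre
    | some hi =>
      rw [thmA crabs lo hi h1 h2, thmB crabs lo hi h1 h2]
      exact List.map_congr_left (fun i _ => by rw [pvF_eq_pvT])
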